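-- pv_equiv track=rewrite | github.com/martinkabe/MFF | Algoritmizace_a_Programovani/Procviko/Kombinatorika/variace.py | variations_with_repeating
-- ===== SOURCE A (Python) =====
-- from typing import List
--
-- def variations_with_repeating(lst: List, k):
--     l = []
--     for i in range(pow(len(lst), k)):
--         o = []
--         for j in range(k):
--             o.append(lst[i % len(lst)])
--             i = i // len(lst)
--         l.append(o)
--     return l
-- ===== SOURCE B (Python) =====
-- def variations_with_repeating(lst, k):
--     result = [[]]
--     for _ in range(k):
--         result = [p + [e] for e in lst for p in result]
--     return result
-- ===== Notes on version B (the rewrite author's own statement) =====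
-- stated objective: simpler
-- what changed: Builds the cartesian power incrementally (result = [p+[e] for e in lst for p in result], repeated k times) instead of decoding each index i of range(len(lst)**k) by repeated % and // into digits.
import Mathlib
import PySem

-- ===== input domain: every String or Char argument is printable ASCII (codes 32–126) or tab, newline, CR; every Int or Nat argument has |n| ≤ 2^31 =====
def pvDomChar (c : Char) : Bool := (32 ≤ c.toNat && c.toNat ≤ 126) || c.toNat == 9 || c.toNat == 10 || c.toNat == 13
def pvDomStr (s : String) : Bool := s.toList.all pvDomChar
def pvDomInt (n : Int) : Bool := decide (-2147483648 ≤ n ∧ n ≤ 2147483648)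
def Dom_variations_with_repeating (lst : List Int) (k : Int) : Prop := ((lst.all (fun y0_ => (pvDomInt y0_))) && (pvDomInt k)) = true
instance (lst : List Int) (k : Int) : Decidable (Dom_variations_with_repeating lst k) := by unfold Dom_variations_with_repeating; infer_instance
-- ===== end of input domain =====

-- B builds the cartesian power incrementally instead of decoding range(n^k) indices by %//; equally costly, plainer.

-- ===== PORT A =====
-- pow(len(lst), k) = (lst.length : Int) ^ k.toNat is exact for the admitted k ≥ 0 (Pre_ below).
-- lst[i % len(lst)]: whenever the inner body runs, lst is nonempty and the index is in range,
-- so (pyGet? …).getD 0 equals Python's lst[i % len(lst)] exactly.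
def variations_with_repeating (lst : List Int) (k : Int) : List (List Int) :=
  (PySem.List.pyRange 0 ((lst.length : Int) ^ k.toNat) 1).foldl
    (fun l i =>
      let o := (PySem.List.pyRange 0 k 1).foldl
        (fun (s : List Int × Int) _j =>
          (s.1 ++ [(PySem.List.pyGet? lst (PySem.Int.mod s.2 (lst.length : Int))).getD 0],
           PySem.Int.floordiv s.2 (lst.length : Int)))
        ([], i)
      l ++ [o.1]) []

-- ===== PORT B =====
-- [p + [e] for e in lst for p in result] is lst.flatMap (fun e => result.map (fun p => p ++ [e]))
def variations_with_repeating_alt (lst : List Int) (k : Int) : List (List Int) :=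
  (PySem.List.pyRange 0 k 1).foldl
    (fun result _ => lst.flatMap (fun e => result.map (fun p => p ++ [e])))
    [[]]

-- ===== PRECONDITION & SPEC =====
-- A raises for k < 0 (TypeError from range(pow(len(lst), k)) when lst ≠ [], ZeroDivisionError when lst = []);
-- Pre_ admits exactly the k ≥ 0 on which A returns.
def Pre_variations_with_repeating (lst : List Int) (k : Int) : Prop := 0 ≤ k
instance (lst : List Int) (k : Int) : Decidable (Pre_variations_with_repeating lst k) := by unfold Pre_variations_with_repeating; infer_instance
def pvWitness_variations_with_repeating : List Int × Int := ([1, 2], 2)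

def Spec_variations_with_repeating (lst : List Int) (k : Int) (out : List (List Int)) : Prop := out = variations_with_repeating_alt lst k
instance (lst : List Int) (k : Int) (out : List (List Int)) : Decidable (Spec_variations_with_repeating lst k out) := by unfold Spec_variations_with_repeating; infer_instance

-- ===== CLAIM (what is proved, stated in full; the proofs are below) =====
def Claim_equal_variations_with_repeating : Prop := ∀ (lst : List Int) (k : Int), Dom_variations_with_repeating lst k → Pre_variations_with_repeating lst k → Spec_variations_with_repeating lst k (variations_with_repeating lst k)

-- ===== LEMMAS AND PROOFS =====

-- the digit decoding A performs: vdec lst m i = [lst[i % n], lst[(i/n) % n], …] (m digits, n = lst.length)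
def vdec (lst : List Int) : Nat → Nat → List Int
  | 0, _ => []
  | m + 1, i => lst.getD (i % lst.length) 0 :: vdec lst m (i / lst.length)

-- one round of B's comprehension
def vstep (lst : List Int) (res : List (List Int)) : List (List Int) :=
  lst.flatMap (fun e => res.map (fun p => p ++ [e]))

theorem foldl_const_iterate {α β : Type} (f : β → β) (xs : List α) (b : β) :
    xs.foldl (fun acc _ => f acc) b = f^[xs.length] b := by
  induction xs generalizing b with
  | nil => rfl
  | cons x xs ih => simp [List.foldl_cons, ih, Function.iterate_succ_apply]

theorem alt_eq_iterate (lst : List Int) (k : Int) :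
    variations_with_repeating_alt lst k = (vstep lst)^[k.toNat] [[]] := by
  have h := foldl_const_iterate (vstep lst) (PySem.List.pyRange 0 k 1) ([[]] : List (List Int))
  simp only [vstep] at h
  unfold variations_with_repeating_alt
  rw [h, PySem.List.length_pyRange_one]
  norm_num

theorem inner_fold (lst : List Int) (hn : lst ≠ []) (xs : List Int) :
    ∀ (acc : List Int) (i : Nat),
      (xs.foldl
        (fun (s : List Int × Int) _j =>
          (s.1 ++ [(PySem.List.pyGet? lst (PySem.Int.mod s.2 (lst.length : Int))).getD 0],
           PySem.Int.floordiv s.2 (lst.length : Int)))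
        (acc, (i : Nat))).1 = acc ++ vdec lst xs.length i := by
  induction xs with
  | nil => intro acc i; simp [vdec]
  | cons x xs ih =>
    intro acc i
    have hlen : 0 < lst.length := List.length_pos_iff.mpr hn
    have hget : (PySem.List.pyGet? lst ((i % lst.length : Nat) : Int)).getD 0
        = lst.getD (i % lst.length) 0 := by
      have hlt : i % lst.length < lst.length := Nat.mod_lt _ hlen
      rw [PySem.List.pyGet?_natCast]
      simp [List.getD, List.getElem?_eq_getElem hlt]
    simp only [List.foldl_cons, PySem.Int.mod_natCast, PySem.Int.floordiv_natCast, hget]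
    rw [ih]
    simp [vdec]

theorem a_eq_map (lst : List Int) (k : Int) (hk : 0 ≤ k) :
    variations_with_repeating lst k
      = (List.range (lst.length ^ k.toNat)).map (fun i => vdec lst k.toNat i) := by
  have hpow : ((lst.length : Int) ^ k.toNat) = ((lst.length ^ k.toNat : Nat) : Int) := by
    push_cast; ring
  unfold variations_with_repeating
  rw [PySem.List.foldl_append_singleton_eq_map, hpow, PySem.List.pyRange_zero_nat,
    List.map_map, List.nil_append]
  apply List.map_congr_left
  intro i hi
  simp only [Function.comp_apply]
  rcases eq_or_ne lst [] with rfl | hn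
  · -- lst = []: the outer range is nonempty only when k = 0, and then the inner loop is empty
    have hm : k.toNat = 0 := by
      by_contra hm
      rw [List.length_nil, Nat.zero_pow (Nat.pos_of_ne_zero hm)] at hi
      simp at hi
    have hk0 : k = 0 := by omega
    subst hk0
    simp [hm, vdec, PySem.List.pyRange_one_eq_nil (le_refl (0 : Int))]
  · rw [inner_fold lst hn (PySem.List.pyRange 0 k 1) [] i, List.nil_append,
      PySem.List.length_pyRange_one]
    norm_num

-- the top digit of an (m+1)-digit number splits off at the END of the decoded list
theorem vdec_split (lst : List Int) :
    ∀ (m j r : Nat), r < lst.length ^ m → j < lst.length →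
      vdec lst (m + 1) (j * lst.length ^ m + r) = vdec lst m r ++ [lst.getD j 0] := by
  intro m
  induction m with
  | zero =>
    intro j r hr hj
    have hr0 : r = 0 := by simpa using hr
    subst hr0
    simp [vdec, Nat.mod_eq_of_lt hj]
  | succ m ih =>
    intro j r hr hj
    have hn : 0 < lst.length := Nat.zero_lt_of_lt hj
    have e1 : j * lst.length ^ (m + 1) + r = lst.length * (j * lst.length ^ m) + r := by ring
    have hmod : (j * lst.length ^ (m + 1) + r) % lst.length = r % lst.length := by
      rw [e1, Nat.mul_add_mod]
    have hdivlt : r / lst.length < lst.length ^ m :=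
      Nat.div_lt_of_lt_mul (by rw [pow_succ, Nat.mul_comm] at hr; exact hr)
    have hdiv : (j * lst.length ^ (m + 1) + r) / lst.length = j * lst.length ^ m + r / lst.length := by
      rw [e1, Nat.mul_add_div hn]
    show vdec lst (m + 1 + 1) _ = _
    rw [vdec, hmod, hdiv, ih j (r / lst.length) hdivlt hj]
    simp [vdec]

-- one comprehension round over the suffix lst.drop j appends the digits j, j+1, … as blocks
theorem vdec_blocks (lst : List Int) (m : Nat) :
    ∀ (suf : List Int) (j : Nat), lst.drop j = suf →
      suf.flatMap (fun e => (List.range (lst.length ^ m)).map (fun r => vdec lst m r ++ [e]))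
        = (List.range (suf.length * lst.length ^ m)).map
            (fun r => vdec lst (m + 1) (j * lst.length ^ m + r)) := by
  intro suf
  induction suf with
  | nil => intro j h; simp
  | cons e rest ih =>
    intro j h
    have hj : j < lst.length := by
      by_contra hge
      have hnil : lst.drop j = [] := List.drop_eq_nil_of_le (by omega)
      rw [h] at hnil
      simp at hnil
    have he : lst.getD j 0 = e := by
      have h0 : (lst.drop j)[0]? = some e := by rw [h]; rfl
      rw [List.getElem?_drop] at h0
      simp only [Nat.add_zero] at h0
      simp [List.getD, h0]
    have hrest : lst.drop (j + 1) = rest := by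
      have hd : lst.drop (j + 1) = (lst.drop j).drop 1 := by
        rw [List.drop_drop]
      rw [hd, h]
      rfl
    have hlen : (e :: rest).length * lst.length ^ m
        = lst.length ^ m + rest.length * lst.length ^ m := by
      simp [List.length_cons]
      ring
    rw [List.flatMap_cons, ih (j + 1) hrest, hlen, List.range_add, List.map_append, List.map_map]
    congr 1
    · apply List.map_congr_left
      intro r hr
      rw [vdec_split lst m j r (List.mem_range.mp hr) hj, he]
    · apply List.map_congr_left
      intro r _
      simp only [Function.comp_apply]
      congr 1
      ring

theorem iterate_eq_map (lst : List Int) :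
    ∀ m : Nat, (vstep lst)^[m] [[]]
      = (List.range (lst.length ^ m)).map (fun i => vdec lst m i) := by
  intro m
  induction m with
  | zero => simp [vdec]
  | succ m ih =>
    rw [Function.iterate_succ_apply', ih]
    rcases eq_or_ne lst [] with rfl | hn
    · simp [vstep, Nat.zero_pow (Nat.succ_pos m)]
    · have hstep : vstep lst ((List.range (lst.length ^ m)).map (fun i => vdec lst m i))
          = lst.flatMap (fun e => (List.range (lst.length ^ m)).map (fun r => vdec lst m r ++ [e])) := by
        simp only [vstep, List.map_map]
        rfl
      rw [hstep, vdec_blocks lst m lst 0 List.drop_zero]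
      have hl : lst.length * lst.length ^ m = lst.length ^ (m + 1) := by ring
      rw [hl]
      apply List.map_congr_left
      intro r _
      simp

-- ===== VERDICT (by name: the statement is the Claim_ definition above) =====
theorem variations_with_repeating_spec : Claim_equal_variations_with_repeating := by
  intro lst k _hd hk
  unfold Spec_variations_with_repeating
  rw [a_eq_map lst k hk, alt_eq_iterate lst k, iterate_eq_map]
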